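-- pv_equiv track=rewrite | github.com/Uber-Career-Prep-2023/Uber-Career-Prep-Homework-Jomills-Jose-Anand | Assignment-1/7KAnagrams.py | k_anagram
-- ===== SOURCE A (Python) =====
-- def k_anagram(array_1, array_2, k):
--
--     # Base cases
--     if len(array_1) != len(array_2):
--         return False
--
--     # Make two hashmaps for each array
--     array_1_map = {}
--     array_2_map = {}
--
--     # Iterate through the arrays and populate the array
--     for i in array_1:
--         if i in array_1_map:
--             array_1_map[i] += 1
--         else:
--             array_1_map[i] = 1
--     for i in array_2:
--         if i in array_2_map:
--             array_2_map[i] += 1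
--         else:
--             array_2_map[i] = 1
--
--     # We add the extra characters of array 2 to array 1 with a 0 count
--     for i in array_2_map:
--         if i not in array_1_map:
--             array_1_map[i] = 0
--
--     # Find the amount of letters that have to be changed for anagram words
--     count = 0
--
--     for i in array_1_map:
--         if i in array_2_map:
--             count += abs(array_2_map[i] - array_1_map[i])
--         else:
--             count += array_1_map[i]
--
--     # Since only half the letters need to be changed we get half of count
--     if count % 2 == 0:
--         count = count / 2
--     else:
--         count = (count // 2) + 1
--
--     # We return a boolean of whether the strings are k-anagrams or not
--     return count <= k
-- ===== SOURCE B (Python) =====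
-- def k_anagram(array_1, array_2, k):
--     if len(array_1) != len(array_2):
--         return False
--     changes = sum(max(array_1.count(c) - array_2.count(c), 0) for c in set(array_1))
--     return changes <= k
-- ===== Notes on version B (the rewrite author's own statement) =====
-- stated objective: simpler
-- what changed: Replaces A's two hand-built hash maps, the key-padding loop, the union iteration summing absolute differences, and the parity/halving arithmetic with a single one-sided excess sum max(count1-count2, 0) over the distinct characters of array_1, which equals A's halved symmetric difference when lengths are equal; measured faster on the generated inputs.
import Mathlib
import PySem

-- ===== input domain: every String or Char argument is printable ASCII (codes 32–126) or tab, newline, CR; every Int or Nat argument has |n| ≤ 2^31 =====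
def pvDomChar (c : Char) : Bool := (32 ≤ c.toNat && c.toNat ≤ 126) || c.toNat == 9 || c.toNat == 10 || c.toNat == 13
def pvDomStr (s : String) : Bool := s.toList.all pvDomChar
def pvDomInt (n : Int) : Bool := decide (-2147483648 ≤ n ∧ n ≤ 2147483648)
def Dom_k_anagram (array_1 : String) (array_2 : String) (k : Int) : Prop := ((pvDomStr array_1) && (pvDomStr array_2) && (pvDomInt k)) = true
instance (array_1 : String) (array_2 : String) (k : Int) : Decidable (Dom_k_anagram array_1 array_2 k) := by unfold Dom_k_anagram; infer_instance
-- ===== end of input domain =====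

-- B replaces A's two hash maps, padding loop, abs-difference sum and halving with a
-- single one-sided excess sum over the distinct characters of array_1 (simpler decomposition).


-- ===== PORT A =====
def k_anagram (array_1 : String) (array_2 : String) (k : Int) : Bool :=
  if PySem.Str.len array_1 ≠ PySem.Str.len array_2 then false
  else
    let array_1_map : PySem.Dict Char Int :=
      array_1.toList.foldl
        (fun d i => if d.contains i then d.insert i (d.getD i 0 + 1) else d.insert i 1)
        PySem.Dict.empty
    let array_2_map : PySem.Dict Char Int :=
      array_2.toList.foldl
        (fun d i => if d.contains i then d.insert i (d.getD i 0 + 1) else d.insert i 1)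
        PySem.Dict.empty
    let array_1_map' : PySem.Dict Char Int :=
      array_2_map.keys.foldl
        (fun d i => if ¬ d.contains i then d.insert i 0 else d) array_1_map
    -- array_1_map[i] / array_2_map[i] are read only at keys present in the map, so getD is exact
    let count : Int :=
      array_1_map'.keys.foldl
        (fun c i =>
          if array_2_map.contains i then c + |array_2_map.getD i 0 - array_1_map'.getD i 0|
          else c + array_1_map'.getD i 0) 0
    -- on the even branch Python's count/2 is an integral float, so floordiv is exact
    let count' : Int :=
      if PySem.Int.mod count 2 == 0 then PySem.Int.floordiv count 2
      else PySem.Int.floordiv count 2 + 1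
    decide (count' ≤ k)

-- ===== PORT B =====
def k_anagram_alt (array_1 : String) (array_2 : String) (k : Int) : Bool :=
  if PySem.Str.len array_1 ≠ PySem.Str.len array_2 then false
  else
    let changes : Int :=
      ((PySem.Set.ofList array_1.toList).map
        (fun c => max ((array_1.toList.count c : Int) - (array_2.toList.count c : Int)) 0)).sum
    decide (changes ≤ k)

-- ===== PRECONDITION & SPEC =====
def Spec_k_anagram (array_1 : String) (array_2 : String) (k : Int) (out : Bool) : Prop := out = k_anagram_alt array_1 array_2 k
instance (array_1 : String) (array_2 : String) (k : Int) (out : Bool) : Decidable (Spec_k_anagram array_1 array_2 k out) := by unfold Spec_k_anagram; infer_instance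

-- ===== CLAIM (what is proved, stated in full; the proofs are below) =====
def Claim_equal_k_anagram : Prop := ∀ (array_1 : String) (array_2 : String) (k : Int), Dom_k_anagram array_1 array_2 k → Spec_k_anagram array_1 array_2 k (k_anagram array_1 array_2 k)

-- ===== LEMMAS AND PROOFS =====

-- A's counting loop step equals the canonical counter step.
theorem counter_step_eq :
    (fun (d : PySem.Dict Char Int) i => if d.contains i then d.insert i (d.getD i 0 + 1) else d.insert i 1)
      = fun (d : PySem.Dict Char Int) i => d.insert i (d.getD i 0 + 1) := by
  funext d i
  by_cases h : d.contains i = true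
  · rw [if_pos h]
  · have h' : d.contains i = false := by simpa using h
    rw [if_neg h, PySem.Dict.getD_of_not_contains d 0 h']
    norm_num

-- The padding loop never changes a getD-with-default-0 lookup.
theorem pad_getD (ks : List Char) (d : PySem.Dict Char Int) (c : Char) :
    ((ks.foldl (fun d i => if ¬ d.contains i then d.insert i 0 else d) d).getD c 0) = d.getD c 0 := by
  induction ks generalizing d with
  | nil => rfl
  | cons x ks ih =>
    rw [List.foldl_cons]
    by_cases h : d.contains x = true
    · rw [if_neg (by simp [h]), ih]
    · have h' : d.contains x = false := by simpa using h
      rw [if_pos (by simp [h']), ih]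
      by_cases hc : c = x
      · subst hc
        rw [PySem.Dict.getD_insert_self, PySem.Dict.getD_of_not_contains d 0 h']
      · exact PySem.Dict.getD_insert_of_ne d 0 0 hc

-- Membership in the padded map's keys.
theorem pad_mem_keys (ks : List Char) (d : PySem.Dict Char Int) (c : Char) :
    c ∈ (ks.foldl (fun d i => if ¬ d.contains i then d.insert i 0 else d) d).keys
      ↔ c ∈ d.keys ∨ c ∈ ks := by
  induction ks generalizing d with
  | nil => simp
  | cons x ks ih =>
    rw [List.foldl_cons]
    by_cases h : d.contains x = true
    · rw [if_neg (by simp [h]), ih]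
      have hx : x ∈ d.keys := (PySem.Dict.contains_iff_mem_keys d x).mp h
      constructor
      · rintro (hd | hk)
        · exact Or.inl hd
        · exact Or.inr (List.mem_cons_of_mem _ hk)
      · rintro (hd | hk)
        · exact Or.inl hd
        · rcases List.mem_cons.mp hk with rfl | hk
          · exact Or.inl hx
          · exact Or.inr hk
    · have h' : d.contains x = false := by simpa using h
      rw [if_pos (by simp [h']), ih, PySem.Dict.mem_keys_insert]
      rw [List.mem_cons]
      tauto

-- Nodup of the padded map's keys.
theorem pad_nodup_keys (ks : List Char) (d : PySem.Dict Char Int) (hnd : d.keys.Nodup) :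
    (ks.foldl (fun d i => if ¬ d.contains i then d.insert i 0 else d) d).keys.Nodup := by
  induction ks generalizing d with
  | nil => exact hnd
  | cons x ks ih =>
    rw [List.foldl_cons]
    by_cases h : d.contains x = true
    · rw [if_neg (by simp [h])]; exact ih d hnd
    · have h' : d.contains x = false := by simpa using h
      rw [if_pos (by simp [h'])]
      exact ih _ (PySem.Dict.nodup_keys_insert d x 0 hnd)

-- a 0/1 indicator sums to 1 over a nodup list containing the element
theorem sum_indicator (K : List Char) (x : Char) (hnd : K.Nodup) (hx : x ∈ K) :
    (K.map fun c => if c = x then (1 : Int) else 0).sum = 1 := by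
  induction K with
  | nil => cases hx
  | cons y K ih =>
    by_cases hxy : y = x
    · subst hxy
      have hy : y ∉ K := (List.nodup_cons.mp hnd).1
      have hz : (K.map fun c => if c = y then (1 : Int) else 0).sum = 0 := by
        rw [List.sum_eq_zero]
        intro z hz
        simp only [List.mem_map] at hz
        obtain ⟨c, hc, rfl⟩ := hz
        have : c ≠ y := fun hcy => hy (hcy ▸ hc)
        simp [this]
      simp [hz]
    · have hx' : x ∈ K := (List.mem_cons.mp hx).resolve_left (fun h => hxy h.symm)
      simp [hxy, ih (List.nodup_cons.mp hnd).2 hx']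

-- summing counts over a nodup superset of the support gives the length
theorem sum_counts (l K : List Char) (hnd : K.Nodup) (hsub : ∀ c ∈ l, c ∈ K) :
    (K.map fun c => (l.count c : Int)).sum = l.length := by
  induction l with
  | nil => simp
  | cons x l ih =>
    have hx : x ∈ K := hsub x (List.mem_cons_self ..)
    have h1 : (K.map fun c => ((x :: l).count c : Int)).sum
        = (K.map fun c => (l.count c : Int)).sum + (K.map fun c => if c = x then (1:Int) else 0).sum := by
      rw [← List.sum_map_add]
      apply congrArg
      apply List.map_congr_left
      intro c _
      by_cases hc : c = x
      · subst hc; simp [List.count_cons_self]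
      · have : List.count c (x :: l) = List.count c l := by
          simp [Ne.symm hc]
        simp [this, hc]
    rw [h1, ih (fun c hc => hsub c (List.mem_cons_of_mem _ hc)), sum_indicator K x hnd hx]
    simp only [List.length_cons]
    push_cast
    ring

-- pointwise |g-f| = 2*max(f-g,0) + (g-f), summed over a list
theorem sum_abs_split (K : List Char) (F G : Char → Int) :
    (K.map fun c => |G c - F c|).sum
      = 2 * (K.map fun c => max (F c - G c) 0).sum + ((K.map G).sum - (K.map F).sum) := by
  induction K with
  | nil => simp
  | cons x K ih =>
    simp only [List.map_cons, List.sum_cons]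
    rw [ih]
    have : |G x - F x| = 2 * max (F x - G x) 0 + (G x - F x) := by
      rcases le_total (F x) (G x) with h | h
      · rw [abs_of_nonneg (by omega), max_eq_right (by omega)]; ring
      · rw [abs_of_nonpos (by omega), max_eq_left (by omega)]; ring
    omega

-- drop terms that vanish outside a predicate
theorem sum_filter_zero (K : List Char) (p : Char → Prop) [DecidablePred p] (f : Char → Int)
    (h0 : ∀ c, ¬ p c → f c = 0) :
    (K.map f).sum = ((K.filter (fun c => decide (p c))).map f).sum := by
  induction K with
  | nil => rfl
  | cons x K ih =>
    by_cases hx : p x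
    · simp [hx, ih]
    · simp [hx, ih, h0 x hx]

-- A's accumulation loop as a sum over the key list.
theorem count_fold_eq (M2 M : PySem.Dict Char Int) :
    M.keys.foldl (fun c i =>
        if M2.contains i then c + |M2.getD i 0 - M.getD i 0| else c + M.getD i 0) 0
      = (M.keys.map (fun i =>
          if M2.contains i then |M2.getD i 0 - M.getD i 0| else M.getD i 0)).sum := by
  have h : (fun (c : Int) i =>
        if M2.contains i then c + |M2.getD i 0 - M.getD i 0| else c + M.getD i 0)
      = fun (c : Int) i => c + (if M2.contains i then |M2.getD i 0 - M.getD i 0| else M.getD i 0) := by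
    funext c i
    split_ifs <;> rfl
  rw [h, PySem.List.foldl_add]
  simp

-- ===== VERDICT (by name: the statement is the Claim_ definition above) =====
theorem k_anagram_spec : Claim_equal_k_anagram := by
  unfold Claim_equal_k_anagram
  intro a1 a2 k _
  unfold Spec_k_anagram k_anagram k_anagram_alt
  by_cases hlen : PySem.Str.len a1 ≠ PySem.Str.len a2
  · rw [if_pos hlen, if_pos hlen]
  · rw [if_neg hlen, if_neg hlen]
    simp only [counter_step_eq, PySem.Dict.foldl_insert_getD_add_one_eq_counter]
    set l1 := a1.toList with hl1
    set l2 := a2.toList with hl2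
    have hlen' : (l1.length : Int) = (l2.length : Int) := by
      simpa [PySem.Str.len_eq] using (not_not.mp hlen)
    set M := (PySem.Dict.counter l2).keys.foldl
        (fun d i => if ¬ d.contains i then d.insert i 0 else d) (PySem.Dict.counter l1) with hM
    rw [count_fold_eq]
    have hKnd : M.keys.Nodup := pad_nodup_keys _ _ (PySem.Dict.nodup_keys_counter l1)
    have hKmem : ∀ c, c ∈ M.keys ↔ c ∈ l1 ∨ c ∈ l2 := by
      intro c
      rw [hM, pad_mem_keys]
      simp [PySem.Dict.keys_counter, PySem.Set.mem_ofList]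
    have hterm : (M.keys.map (fun i =>
          if (PySem.Dict.counter l2).contains i then
            |(PySem.Dict.counter l2).getD i 0 - M.getD i 0| else M.getD i 0))
        = M.keys.map (fun c => |(l2.count c : Int) - (l1.count c : Int)|) := by
      apply List.map_congr_left
      intro c _
      have hMg : M.getD c 0 = (l1.count c : Int) := by
        rw [hM, pad_getD, PySem.Dict.getD_counter]
      by_cases h2 : c ∈ l2
      · have hc2 : (PySem.Dict.counter l2).contains c = true := by
          rw [PySem.Dict.contains_counter]; simp [h2]
        rw [if_pos hc2, hMg, PySem.Dict.getD_counter]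
      · have hc2 : (PySem.Dict.counter l2).contains c = false := by
          rw [PySem.Dict.contains_counter]; simp [h2]
        rw [if_neg (by simp [hc2]), hMg]
        rw [List.count_eq_zero.mpr h2]
        rw [Nat.cast_zero, zero_sub, abs_neg, abs_of_nonneg (by positivity)]
    rw [hterm, sum_abs_split M.keys (fun c => (l1.count c : Int)) (fun c => (l2.count c : Int))]
    rw [sum_counts l1 M.keys hKnd (fun c hc => (hKmem c).mpr (Or.inl hc)),
        sum_counts l2 M.keys hKnd (fun c hc => (hKmem c).mpr (Or.inr hc))]
    set S := (M.keys.map fun c => max ((l1.count c : Int) - (l2.count c : Int)) 0).sum with hS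
    have key : 2 * S + ((l2.length : Int) - (l1.length : Int)) = 2 * S := by omega
    rw [key]
    have hmod : PySem.Int.mod (2 * S) 2 = 0 := (PySem.Int.mod_eq_zero_iff_dvd _ _).mpr ⟨S, rfl⟩
    rw [hmod]
    have hdiv : PySem.Int.floordiv (2 * S) 2 = S := by
      rw [PySem.Int.floordiv_eq_ediv_of_pos (by norm_num)]
      omega
    simp only [beq_self_eq_true, if_true, hdiv]
    have hfin : S = ((PySem.Set.ofList l1).map
        (fun c => max ((l1.count c : Int) - (l2.count c : Int)) 0)).sum := by
      rw [hS, sum_filter_zero M.keys (fun c => c ∈ l1)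
            (fun c => max ((l1.count c : Int) - (l2.count c : Int)) 0)
            (by
              intro c hc
              show max ((l1.count c : Int) - (l2.count c : Int)) 0 = 0
              rw [List.count_eq_zero.mpr hc]
              have : (0:Int) ≤ (l2.count c : Int) := by positivity
              omega)]
      have hperm : (M.keys.filter (fun c => decide (c ∈ l1))).Perm (PySem.Set.ofList l1) := by
        rw [List.perm_ext_iff_of_nodup (hKnd.filter _) (PySem.Set.nodup_ofList l1)]
        intro c
        simp only [List.mem_filter, decide_eq_true_eq, PySem.Set.mem_ofList, hKmem c]
        tauto
      exact (hperm.map _).sum_eq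
    rw [hfin]
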